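-- pv_equiv track=rewrite | github.com/deepjoydas/python_questions_for_interview_prep | code1.py | solution
-- ===== SOURCE A (Python) =====
-- def solution(S):
--     seen_b = False
--
--     for char in S:
--         if char == 'b':
--             seen_b = True
--         elif seen_b:
--             return False
--
--     return True
-- ===== SOURCE B (Python) =====
-- def solution(S):
--     # back-to-front: pop the trailing run of 'b', then the remainder must
--     # contain no 'b' at all (valid strings are exactly non-b* followed by b*)
--     chars = list(S)
--     while chars and chars[-1] == 'b':
--         chars.pop()
--     return 'b' not in chars
-- ===== Notes on version B (the rewrite author's own statement) =====
-- stated objective: alternative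
-- what changed: Replaced A's forward scan with a seen_b flag by a back-to-front approach: pop the trailing run of the target character, then a membership test that it occurs nowhere in the remainder.
import Mathlib
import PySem

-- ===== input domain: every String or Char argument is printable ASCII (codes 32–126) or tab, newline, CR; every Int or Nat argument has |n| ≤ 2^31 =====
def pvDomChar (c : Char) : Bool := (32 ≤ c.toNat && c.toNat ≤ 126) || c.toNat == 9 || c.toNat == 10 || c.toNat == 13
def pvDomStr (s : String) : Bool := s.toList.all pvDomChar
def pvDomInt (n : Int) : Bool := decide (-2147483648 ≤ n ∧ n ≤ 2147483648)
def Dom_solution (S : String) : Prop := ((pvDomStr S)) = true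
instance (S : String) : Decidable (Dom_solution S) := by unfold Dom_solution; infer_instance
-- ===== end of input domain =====

-- B replaces A's forward seen_b-flag scan by a back-to-front strategy: pop the
-- trailing run of 'b', then check no 'b' remains (alternative decomposition).

-- ===== PORT A =====
-- A's for-loop with the seen_b flag and the early `return False`
def solutionLoop : List Char → Bool → Bool
  | [], _ => true
  | c :: cs, seen =>
    if c = 'b' then solutionLoop cs true
    else if seen then false
    else solutionLoop cs seen

def solution (S : String) : Bool := solutionLoop S.toList false

-- ===== PORT B =====
-- the `while chars and chars[-1]=='b': chars.pop()` loop: popping from the end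
-- while the last element is 'b' is exactly dropWhile on the reversed list
def stripTrailB (l : List Char) : List Char :=
  (l.reverse.dropWhile (fun c => c == 'b')).reverse

def solution_alt (S : String) : Bool :=
  !((stripTrailB S.toList).contains 'b')

-- ===== PRECONDITION & SPEC =====
def Spec_solution (S : String) (out : Bool) : Prop := out = solution_alt S
instance (S : String) (out : Bool) : Decidable (Spec_solution S out) := by unfold Spec_solution; infer_instance

-- ===== CLAIM (what is proved, stated in full; the proofs are below) =====
def Claim_equal_solution : Prop := ∀ (S : String), Dom_solution S → Spec_solution S (solution S)

-- ===== LEMMAS AND PROOFS =====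
-- once seen_b is set, A's loop just checks all remaining chars are 'b'
theorem solutionLoop_true (l : List Char) :
    solutionLoop l true = l.all (fun c => c == 'b') := by
  induction l with
  | nil => rfl
  | cons c cs ih =>
    by_cases h : c = 'b' <;> simp [solutionLoop, h, ih]

-- appending a 'b' does not change A's verdict
theorem solutionLoop_append_b (l : List Char) :
    ∀ seen, solutionLoop (l ++ ['b']) seen = solutionLoop l seen := by
  induction l with
  | nil => intro seen; simp [solutionLoop]
  | cons c cs ih =>
    intro seen
    by_cases h : c = 'b' <;> simp [solutionLoop, h, ih]

-- appending a non-'b' makes A's verdict "no 'b' anywhere"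
theorem solutionLoop_append_nonb (l : List Char) (c : Char) (hc : ¬ c = 'b') :
    solutionLoop (l ++ [c]) false = !(l.contains 'b') := by
  induction l with
  | nil => simp [solutionLoop, hc]
  | cons x xs ih =>
    by_cases h : x = 'b'
    · simp [solutionLoop, h, solutionLoop_true, List.all_append, hc]
    · simp [solutionLoop, h, ih]
      exact fun _ hh => h hh.symm

theorem main_eq (l : List Char) :
    solutionLoop l false = !((l.reverse.dropWhile (fun c => c == 'b')).reverse.contains 'b') := by
  induction l using List.reverseRecOn with
  | nil => rfl
  | append_singleton xs c ih =>
    by_cases h : c = 'b'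
    · simpa [h, List.dropWhile, solutionLoop_append_b] using ih
    · have hb : (c == 'b') = false := by simp [h]
      simp [solutionLoop_append_nonb xs c h, hb]
      exact fun _ hh => h hh.symm

-- ===== VERDICT (by name: the statement is the Claim_ definition above) =====
theorem solution_spec : Claim_equal_solution := by
  intro S _
  unfold Spec_solution solution solution_alt stripTrailB
  exact main_eq S.toList
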